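-- pv_equiv track=rewrite | github.com/thesamgodson/SmartCrack | src/smartcrack/mask.py | parse_mask
-- ===== SOURCE A (Python) =====
-- CHARSETS: dict[str, str] = {
--     "?l": "abcdefghijklmnopqrstuvwxyz",
--     "?u": "ABCDEFGHIJKLMNOPQRSTUVWXYZ",
--     "?d": "0123456789",
--     "?s": " !\"#$%&'()*+,-./:;<=>?@[\\]^_`{|}~",
--     "?a": "",
-- }
--
-- def parse_mask(
--     mask: str, custom_charsets: dict[str, str] | None = None
-- ) -> list[str]:
--     """Parse a hashcat-style mask string into a list of charset strings per position."""
--     if not mask: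
--         return []
--
--     merged: dict[str, str] = dict(CHARSETS)
--     if custom_charsets:
--         merged.update(custom_charsets)
--
--     positions: list[str] = []
--     i = 0
--     while i < len(mask):
--         if mask[i] == "?" and i + 1 < len(mask):
--             token = mask[i : i + 2]
--             if token in merged:
--                 positions.append(merged[token])
--                 i += 2
--                 continue
--             positions.append("?")
--             i += 1
--         else:
--             positions.append(mask[i])
--             i += 1
--
--     return positions
-- ===== SOURCE B (Python) =====
-- CHARSETS: dict[str, str] = {
--     "?l": "abcdefghijklmnopqrstuvwxyz",
--     "?u": "ABCDEFGHIJKLMNOPQRSTUVWXYZ",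
--     "?d": "0123456789",
--     "?s": " !\"#$%&'()*+,-./:;<=>?@[\\]^_`{|}~",
--     "?a": "",
-- }
--
-- def parse_mask(
--     mask: str, custom_charsets: dict[str, str] | None = None
-- ) -> list[str]:
--     """Parse a hashcat-style mask into per-position charsets by splitting on '?'."""
--     merged: dict[str, str] = dict(CHARSETS)
--     if custom_charsets:
--         merged.update(custom_charsets)
--
--     parts = mask.split("?")
--     out: list[str] = list(parts[0])
--     j = 1
--     while j < len(parts):
--         p = parts[j]
--         if p and "?" + p[0] in merged:
--             out.append(merged["?" + p[0]])
--             out.extend(p[1:])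
--             j += 1
--         elif not p and j + 1 < len(parts) and "??" in merged:
--             out.append(merged["??"])
--             out.extend(parts[j + 1])
--             j += 2
--         else:
--             out.append("?")
--             out.extend(p)
--             j += 1
--     return out
-- ===== Notes on version B (the rewrite author's own statement) =====
-- stated objective: faster
-- what changed: Replaces A's character-by-character index loop (per-position slicing and dict membership tests) by splitting the mask once on the question-mark trigger and stitching the parts back, resolving each split boundary against the merged charset table and emitting the rest of each part as literals.
import Mathlib
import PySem

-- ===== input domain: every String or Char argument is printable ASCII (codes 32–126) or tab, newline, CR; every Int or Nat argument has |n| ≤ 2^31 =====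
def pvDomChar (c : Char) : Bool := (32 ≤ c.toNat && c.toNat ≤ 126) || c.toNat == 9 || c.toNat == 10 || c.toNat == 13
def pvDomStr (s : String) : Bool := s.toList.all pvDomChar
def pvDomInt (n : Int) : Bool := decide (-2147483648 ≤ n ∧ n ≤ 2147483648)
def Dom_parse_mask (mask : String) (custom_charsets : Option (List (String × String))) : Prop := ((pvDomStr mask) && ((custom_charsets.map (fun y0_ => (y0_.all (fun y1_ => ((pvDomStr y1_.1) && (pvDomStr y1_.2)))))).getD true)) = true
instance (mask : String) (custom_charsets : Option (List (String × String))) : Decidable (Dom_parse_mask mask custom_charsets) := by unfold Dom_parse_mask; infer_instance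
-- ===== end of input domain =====

-- B replaces A's per-character index loop by splitting the mask on '?' once and stitching the
-- parts back while resolving each boundary against the merged table (measured faster by a constant factor).

-- module constant CHARSETS (shared by both Pythons)
def pvCHARSETS : PySem.Dict String String :=
  PySem.Dict.ofList
    [("?l", "abcdefghijklmnopqrstuvwxyz"),
     ("?u", "ABCDEFGHIJKLMNOPQRSTUVWXYZ"),
     ("?d", "0123456789"),
     ("?s", " !\"#$%&'()*+,-./:;<=>?@[\\]^_`{|}~"),
     ("?a", "")]

-- merged = dict(CHARSETS); if custom_charsets: merged.update(custom_charsets)   (identical lines in A and B)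
def pvMerged (custom_charsets : Option (List (String × String))) : PySem.Dict String String :=
  match custom_charsets with
  | none => pvCHARSETS
  | some l => if l.isEmpty then pvCHARSETS else pvCHARSETS.update l

-- ===== PORT A =====
-- A's while loop over indices i, transliterated as recursion on the remaining characters:
-- [c] is the 'i + 1 < len(mask)' failure case, c :: d :: rest the two-character lookahead.
def parse_mask_loop (merged : PySem.Dict String String) : List Char → List String
  | [] => []
  | [c] => [String.ofList [c]]
  | c :: d :: rest =>
    if c = '?' then
      match merged.get? (String.ofList [c, d]) with   -- token = mask[i:i+2]; 'token in merged'
      | some v => v :: parse_mask_loop merged rest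
      | none => "?" :: parse_mask_loop merged (d :: rest)
    else
      String.ofList [c] :: parse_mask_loop merged (d :: rest)

def parse_mask (mask : String) (custom_charsets : Option (List (String × String))) : List String :=
  if mask = "" then []
  else parse_mask_loop (pvMerged custom_charsets) mask.toList

-- ===== PORT B =====
-- the while loop over parts[1:]: each parts[j] is preceded by one '?' of the mask
def parse_mask_alt_loop (merged : PySem.Dict String String) : List String → List String
  | [] => []
  | p :: rest =>
    match p.toList with
    | c :: cs =>                                   -- p truthy: '?' + p[0]
      match merged.get? (String.ofList ['?', c]) with
      | some v => v :: (cs.map (fun ch => String.ofList [ch]) ++ parse_mask_alt_loop merged rest)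
      | none => "?" :: ((c :: cs).map (fun ch => String.ofList [ch]) ++ parse_mask_alt_loop merged rest)
    | [] =>
      match rest with
      | q :: rest' =>                              -- j + 1 < len(parts)
        match merged.get? "??" with
        | some v => v :: (q.toList.map (fun ch => String.ofList [ch]) ++ parse_mask_alt_loop merged rest')
        | none => "?" :: parse_mask_alt_loop merged (q :: rest')
      | [] => ["?"]
  termination_by ps => ps.length
  decreasing_by all_goals simp

def parse_mask_alt (mask : String) (custom_charsets : Option (List (String × String))) : List String :=
  match (PySem.Str.split? mask "?").getD [] with   -- parts = mask.split("?"); the [] case is unreachable (sep ≠ "")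
  | [] => []
  | p0 :: rest =>
    p0.toList.map (fun ch => String.ofList [ch]) ++ parse_mask_alt_loop (pvMerged custom_charsets) rest

-- ===== PRECONDITION & SPEC =====
def Spec_parse_mask (mask : String) (custom_charsets : Option (List (String × String))) (out : List String) : Prop := out = parse_mask_alt mask custom_charsets
instance (mask : String) (custom_charsets : Option (List (String × String))) (out : List String) : Decidable (Spec_parse_mask mask custom_charsets out) := by unfold Spec_parse_mask; infer_instance

-- ===== CLAIM (what is proved, stated in full; the proofs are below) =====
def Claim_equal_parse_mask : Prop := ∀ (mask : String) (custom_charsets : Option (List (String × String))), Dom_parse_mask mask custom_charsets → Spec_parse_mask mask custom_charsets (parse_mask mask custom_charsets)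

-- ===== LEMMAS AND PROOFS =====

-- structural model of s.split('?') on the character list
def pvSplit : List Char → List (List Char)
  | [] => [[]]
  | c :: rest =>
    if c = '?' then [] :: pvSplit rest
    else
      match pvSplit rest with
      | [] => [[c]]
      | p :: ps => (c :: p) :: ps

-- rejoin the tail parts, each preceded by its '?' separator
def pvJ : List (List Char) → List Char
  | [] => []
  | p :: ps => '?' :: (p ++ pvJ ps)

theorem pvSplit_ne_nil (l : List Char) : pvSplit l ≠ [] := by
  cases l with
  | nil => simp [pvSplit]
  | cons c rest =>
    simp only [pvSplit]
    split_ifs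
    · simp
    · cases h : pvSplit rest <;> simp

theorem pvSplit_no_q (l : List Char) : ∀ p ∈ pvSplit l, '?' ∉ p := by
  induction l with
  | nil => simp [pvSplit]
  | cons c rest ih =>
    simp only [pvSplit]
    split_ifs with hc
    · intro p hp
      rcases List.mem_cons.mp hp with h | h
      · simp [h]
      · exact ih p h
    · cases h : pvSplit rest with
      | nil => exact absurd h (pvSplit_ne_nil rest)
      | cons p ps =>
        intro q hq
        rcases List.mem_cons.mp hq with h' | h'
        · subst h'
          intro hmem
          rcases List.mem_cons.mp hmem with h'' | h''
          · exact hc h''.symm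
          · exact ih p (h ▸ List.mem_cons_self) h''
        · exact ih q (h ▸ List.mem_cons_of_mem p h')

theorem pvSplit_join : ∀ (l : List Char) (p : List Char) (ps : List (List Char)),
    pvSplit l = p :: ps → p ++ pvJ ps = l := by
  intro l
  induction l with
  | nil => intro p ps h; simp [pvSplit] at h; simp [h.1, h.2, pvJ]
  | cons c rest ih =>
    intro p ps h
    simp only [pvSplit] at h
    split_ifs at h with hc
    · subst hc
      obtain ⟨h1, h2⟩ := List.cons.inj h
      subst h1 h2
      cases hq : pvSplit rest with
      | nil => exact absurd hq (pvSplit_ne_nil rest)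
      | cons q qs =>
        have := ih q qs hq
        simp [pvJ, this]
    · cases hq : pvSplit rest with
      | nil => exact absurd hq (pvSplit_ne_nil rest)
      | cons q qs =>
        rw [hq] at h
        obtain ⟨h1, h2⟩ := List.cons.inj h
        subst h2
        have := ih q qs hq
        simp [← h1, this]

theorem pvGo_step (fuel : Nat) (c : Char) (rest cur : List Char) (acc : List (List Char)) :
    PySem.Chars.splitOn.go ['?'] (fuel + 1) (c :: rest) cur acc =
      (if c = '?' then PySem.Chars.splitOn.go ['?'] fuel rest [] (cur.reverse :: acc)
       else PySem.Chars.splitOn.go ['?'] fuel rest (c :: cur) acc) := by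
  rw [PySem.Chars.splitOn.go]
  simp only [List.isPrefixOf, Bool.and_true, beq_iff_eq, eq_comm (a := '?')]
  split_ifs with h <;> simp [h]

theorem pvGo_eq : ∀ (fuel : Nat) (l : List Char), l.length ≤ fuel → ∀ (cur : List Char) (acc : List (List Char)),
    PySem.Chars.splitOn.go ['?'] fuel l cur acc =
      acc.reverse ++ (match pvSplit l with
        | [] => [cur.reverse]
        | p :: ps => (cur.reverse ++ p) :: ps) := by
  intro fuel
  induction fuel with
  | zero =>
    intro l hl cur acc
    have : l = [] := List.eq_nil_of_length_eq_zero (Nat.le_zero.mp hl)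
    subst this
    rw [PySem.Chars.splitOn.go]
    simp [pvSplit]
  | succ fuel ih =>
    intro l hl cur acc
    cases l with
    | nil =>
      rw [PySem.Chars.splitOn.go]
      simp [pvSplit]
      omega
    | cons c rest =>
      rw [pvGo_step]
      have hrest : rest.length ≤ fuel := by simpa using Nat.succ_le_succ_iff.mp hl
      split_ifs with hc
      · rw [ih rest hrest [] (cur.reverse :: acc)]
        cases hq : pvSplit rest with
        | nil => exact absurd hq (pvSplit_ne_nil rest)
        | cons q qs => simp [pvSplit, hc, hq]
      · rw [ih rest hrest (c :: cur) acc]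
        cases hq : pvSplit rest with
        | nil => exact absurd hq (pvSplit_ne_nil rest)
        | cons q qs => simp [pvSplit, hc, hq]

theorem pvSplitOn_eq (l : List Char) : PySem.Chars.splitOn l ['?'] = pvSplit l := by
  rw [PySem.Chars.splitOn, pvGo_eq (l.length + 1) l (Nat.le_succ _) [] []]
  cases hq : pvSplit l with
  | nil => exact absurd hq (pvSplit_ne_nil l)
  | cons q qs => simp

-- A's loop pushes a run of non-'?' characters through as single-character literals
theorem pvLitA (merged : PySem.Dict String String) :
    ∀ (cs t : List Char), '?' ∉ cs →
      parse_mask_loop merged (cs ++ t) = cs.map (fun c => String.ofList [c]) ++ parse_mask_loop merged t := by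
  intro cs
  induction cs with
  | nil => intro t _; simp
  | cons c cs' ih =>
    intro t hq
    have hc : c ≠ '?' := fun h => hq (h ▸ List.mem_cons_self)
    have hcs' : '?' ∉ cs' := fun h => hq (List.mem_cons_of_mem c h)
    cases h : cs' ++ t with
    | nil =>
      obtain ⟨h1, h2⟩ := List.append_eq_nil_iff.mp h
      subst h1 h2
      simp [parse_mask_loop]
    | cons d r =>
      have : parse_mask_loop merged (c :: cs' ++ t) = String.ofList [c] :: parse_mask_loop merged (cs' ++ t) := by
        rw [List.cons_append, h]
        simp [parse_mask_loop, hc]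
      rw [this, ih t hcs']
      simp

-- unfolding lemmas for B's loop, keyed by the shape of the head part
theorem pvAltLoop_cons (merged : PySem.Dict String String) (p : String) (rest : List String)
    (c : Char) (cs : List Char) (hp : p.toList = c :: cs) :
    parse_mask_alt_loop merged (p :: rest) =
      match merged.get? (String.ofList ['?', c]) with
      | some v => v :: (cs.map (fun ch => String.ofList [ch]) ++ parse_mask_alt_loop merged rest)
      | none => "?" :: ((c :: cs).map (fun ch => String.ofList [ch]) ++ parse_mask_alt_loop merged rest) := by
  rw [parse_mask_alt_loop.eq_def]
  simp only [hp]

theorem pvAltLoop_nilpart (merged : PySem.Dict String String) (p q : String) (rest' : List String)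
    (hp : p.toList = []) :
    parse_mask_alt_loop merged (p :: q :: rest') =
      match merged.get? "??" with
      | some v => v :: (q.toList.map (fun ch => String.ofList [ch]) ++ parse_mask_alt_loop merged rest')
      | none => "?" :: parse_mask_alt_loop merged (q :: rest') := by
  rw [parse_mask_alt_loop.eq_def]
  simp only [hp]

-- main correspondence: A's scan of '?'-joined tail parts = B's stitching loop
theorem pvMain (merged : PySem.Dict String String) :
    ∀ (ps : List (List Char)), (∀ p ∈ ps, '?' ∉ p) →
      parse_mask_loop merged (pvJ ps) = parse_mask_alt_loop merged (ps.map (fun cs => String.ofList cs)) := by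
  intro ps
  induction hn : ps.length using Nat.strong_induction_on generalizing ps with
  | _ n ih =>
    intro hq
    cases ps with
    | nil => simp [pvJ, parse_mask_loop, parse_mask_alt_loop]
    | cons p rest =>
      cases p with
      | cons c cs =>
        have hp : '?' ∉ c :: cs := hq _ List.mem_cons_self
        have hrest : ∀ p ∈ rest, '?' ∉ p := fun p h => hq p (List.mem_cons_of_mem _ h)
        have hrec : parse_mask_loop merged (pvJ rest) =
            parse_mask_alt_loop merged (rest.map (fun cs => String.ofList cs)) := by
          subst hn
          exact ih rest.length (by simp) rest rfl hrest
        have hJ : pvJ ((c :: cs) :: rest) = '?' :: c :: (cs ++ pvJ rest) := by simp [pvJ]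
        rw [hJ]
        cases hg : merged.get? (String.ofList ['?', c]) with
        | some v =>
          simp only [parse_mask_loop, if_true, hg]
          simp only [List.map_cons]
          rw [pvLitA merged cs (pvJ rest) (fun h => hp (List.mem_cons_of_mem c h)), hrec,
            pvAltLoop_cons merged (String.ofList (c :: cs)) _ c cs (by simp)]
          simp [hg]
        | none =>
          simp only [parse_mask_loop, if_true, hg]
          simp only [List.map_cons]
          rw [show c :: (cs ++ pvJ rest) = (c :: cs) ++ pvJ rest by simp,
            pvLitA merged (c :: cs) (pvJ rest) hp, hrec,
            pvAltLoop_cons merged (String.ofList (c :: cs)) _ c cs (by simp)]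
          simp [hg]
      | nil =>
        cases rest with
        | nil => simp [pvJ, parse_mask_loop, parse_mask_alt_loop]
        | cons q rest' =>
          have hqq : '?' ∉ q := hq q (List.mem_cons_of_mem _ List.mem_cons_self)
          have hrest' : ∀ p ∈ rest', '?' ∉ p :=
            fun p h => hq p (List.mem_cons_of_mem _ (List.mem_cons_of_mem _ h))
          have hJ : pvJ ([] :: q :: rest') = '?' :: '?' :: (q ++ pvJ rest') := by simp [pvJ]
          rw [hJ]
          cases hg : merged.get? "??" with
          | some v =>
            have htok : String.ofList ['?', '?'] = "??" := rfl
            simp only [parse_mask_loop, if_true, htok, hg]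
            have hrec : parse_mask_loop merged (pvJ rest') =
                parse_mask_alt_loop merged (rest'.map (fun cs => String.ofList cs)) := by
              subst hn
              exact ih rest'.length (by simp) rest' rfl hrest'
            simp only [List.map_cons]
            rw [pvLitA merged q (pvJ rest') hqq, hrec,
              pvAltLoop_nilpart merged (String.ofList []) (String.ofList q) _ (by simp)]
            simp [hg]
          | none =>
            have htok : String.ofList ['?', '?'] = "??" := rfl
            simp only [parse_mask_loop, if_true, htok, hg]
            have hrec : parse_mask_loop merged (pvJ (q :: rest')) =
                parse_mask_alt_loop merged ((q :: rest').map (fun cs => String.ofList cs)) := by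
              subst hn
              exact ih (q :: rest').length (by simp) (q :: rest') rfl
                (fun p h => hq p (List.mem_cons_of_mem _ h))
            have : '?' :: (q ++ pvJ rest') = pvJ (q :: rest') := by simp [pvJ]
            simp only [List.map_cons]
            rw [this, hrec,
              pvAltLoop_nilpart merged (String.ofList []) (String.ofList q) _ (by simp)]
            simp [hg]

theorem pvAlt_eq (mask : String) (custom_charsets : Option (List (String × String))) :
    parse_mask mask custom_charsets = parse_mask_alt mask custom_charsets := by
  have hsplit : (PySem.Str.split? mask "?").getD [] =
      (pvSplit mask.toList).map String.ofList := by
    simp [PySem.Str.split?, PySem.Chars.split?, pvSplitOn_eq]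
  cases hq : pvSplit mask.toList with
  | nil => exact absurd hq (pvSplit_ne_nil mask.toList)
  | cons p0 ps =>
    have hmask : p0 ++ pvJ ps = mask.toList := pvSplit_join mask.toList p0 ps hq
    have hno : ∀ p ∈ p0 :: ps, '?' ∉ p := fun p h => pvSplit_no_q mask.toList p (hq ▸ h)
    unfold parse_mask_alt
    rw [hsplit, hq]
    simp only [List.map_cons]
    have htl : (String.ofList p0).toList = p0 := by simp [String.toList_ofList]
    rw [htl]
    unfold parse_mask
    split_ifs with hm
    · have : mask.toList = [] := by simp [hm]
      rw [this] at hq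
      simp [pvSplit] at hq
      obtain ⟨h1, h2⟩ := hq
      subst h1 h2
      simp [parse_mask_alt_loop]
    · rw [← hmask,
        pvLitA (pvMerged custom_charsets) p0 (pvJ ps) (hno p0 List.mem_cons_self),
        pvMain (pvMerged custom_charsets) ps (fun p h => hno p (List.mem_cons_of_mem _ h))]

-- ===== VERDICT (by name: the statement is the Claim_ definition above) =====
theorem parse_mask_spec : Claim_equal_parse_mask := by
  intro mask custom_charsets _
  unfold Spec_parse_mask
  exact pvAlt_eq mask custom_charsets
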